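-- pv_equiv track=rewrite | github.com/FSYFSYFSY/Xray_AI4R_SystemProject | ros2_ws/src/ai4r_pkg/scripts/path_prediction.py | merge_maps
-- ===== SOURCE A (Python) =====
-- def merge_maps(base, addon, vision=750):
--     filtered_x, filtered_y, filtered_c = [], [], []
--     for x, y, c in zip(base["x_list"], base["y_list"], base["c_list"]):
--         if x > vision:
--             filtered_x.append(x)
--             filtered_y.append(y)
--             filtered_c.append(c)
--     return {
--         "x_list": list(addon["x_list"]) + filtered_x,
--         "y_list": list(addon["y_list"]) + filtered_y,
--         "c_list": list(addon["c_list"]) + filtered_c,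
--     }
-- ===== SOURCE B (Python) =====
-- def merge_maps(base, addon, vision=750):
--     flat = []
--     for row in zip(base["x_list"], base["y_list"], base["c_list"]):
--         if row[0] > vision:
--             flat.extend(row)
--     return {
--         "x_list": list(addon["x_list"]) + flat[0::3],
--         "y_list": list(addon["y_list"]) + flat[1::3],
--         "c_list": list(addon["c_list"]) + flat[2::3],
--     }
-- ===== Notes on version B (the rewrite author's own statement) =====
-- stated objective: alternative
-- what changed: A maintains three parallel filtered lists inside the loop; B maintains a single flat interleaved buffer (x,y,c triples extended in one piece) and reconstructs the three output lists afterwards by stride-3 slices flat[0::3], flat[1::3], flat[2::3].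
import Mathlib
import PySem

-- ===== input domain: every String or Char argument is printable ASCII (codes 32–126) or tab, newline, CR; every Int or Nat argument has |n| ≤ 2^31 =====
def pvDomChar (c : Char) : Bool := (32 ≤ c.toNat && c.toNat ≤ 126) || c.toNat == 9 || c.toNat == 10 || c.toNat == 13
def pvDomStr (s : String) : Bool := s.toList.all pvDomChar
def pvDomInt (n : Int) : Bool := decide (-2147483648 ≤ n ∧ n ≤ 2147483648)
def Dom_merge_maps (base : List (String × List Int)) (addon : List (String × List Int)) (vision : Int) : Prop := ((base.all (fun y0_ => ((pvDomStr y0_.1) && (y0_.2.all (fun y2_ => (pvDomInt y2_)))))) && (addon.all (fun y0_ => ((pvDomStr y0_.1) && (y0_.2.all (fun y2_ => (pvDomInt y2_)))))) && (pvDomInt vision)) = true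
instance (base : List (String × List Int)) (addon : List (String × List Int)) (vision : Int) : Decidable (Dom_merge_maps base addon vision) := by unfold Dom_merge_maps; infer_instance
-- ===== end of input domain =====

-- B replaces A's three parallel filtered accumulators by ONE flat interleaved buffer of kept
-- (x,y,c) triples, redistributed afterwards by stride-3 slices flat[0::3]/[1::3]/[2::3] (alternative data structure, same cost).

-- ===== PORT A =====
def merge_maps (base : List (String × List Int)) (addon : List (String × List Int)) (vision : Int) : List (String × List Int) :=
  -- base["x_list"] etc.: dict lookup; Pre_ excludes missing keys (KeyError), so .getD [] is never taken
  let bx := ((PySem.Dict.ofList base).get? "x_list").getD []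
  let by_ := ((PySem.Dict.ofList base).get? "y_list").getD []
  let bc := ((PySem.Dict.ofList base).get? "c_list").getD []
  let ax := ((PySem.Dict.ofList addon).get? "x_list").getD []
  let ay := ((PySem.Dict.ofList addon).get? "y_list").getD []
  let ac := ((PySem.Dict.ofList addon).get? "c_list").getD []
  -- for x, y, c in zip(...): if x > vision: append to the three filtered lists
  let f := (bx.zip (by_.zip bc)).foldl
    (fun (acc : List Int × List Int × List Int) t =>
      if t.1 > vision then (acc.1 ++ [t.1], acc.2.1 ++ [t.2.1], acc.2.2 ++ [t.2.2]) else acc)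
    ([], [], [])
  [("x_list", ax ++ f.1), ("y_list", ay ++ f.2.1), ("c_list", ac ++ f.2.2)]

-- ===== PORT B =====
def merge_maps_alt (base : List (String × List Int)) (addon : List (String × List Int)) (vision : Int) : List (String × List Int) :=
  let bx := ((PySem.Dict.ofList base).get? "x_list").getD []
  let by_ := ((PySem.Dict.ofList base).get? "y_list").getD []
  let bc := ((PySem.Dict.ofList base).get? "c_list").getD []
  -- for row in zip(...): if row[0] > vision: flat.extend(row)  — one flat interleaved buffer
  let flat := (bx.zip (by_.zip bc)).foldl
    (fun (acc : List Int) t =>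
      if t.1 > vision then acc ++ [t.1, t.2.1, t.2.2] else acc)
    []
  -- flat[0::3], flat[1::3], flat[2::3]: step-3 slices never raise (step ≠ 0), so .getD [] is never taken
  [("x_list", (((PySem.Dict.ofList addon).get? "x_list").getD []) ++ (PySem.List.slice? flat (some 0) none 3).getD []),
   ("y_list", (((PySem.Dict.ofList addon).get? "y_list").getD []) ++ (PySem.List.slice? flat (some 1) none 3).getD []),
   ("c_list", (((PySem.Dict.ofList addon).get? "c_list").getD []) ++ (PySem.List.slice? flat (some 2) none 3).getD [])]

-- ===== PRECONDITION & SPEC =====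
-- A raises KeyError when any of the three keys is missing from base or addon; Pre_ requires them present.
def Pre_merge_maps (base : List (String × List Int)) (addon : List (String × List Int)) (_vision : Int) : Prop :=
  "x_list" ∈ base.map Prod.fst ∧ "y_list" ∈ base.map Prod.fst ∧ "c_list" ∈ base.map Prod.fst ∧
  "x_list" ∈ addon.map Prod.fst ∧ "y_list" ∈ addon.map Prod.fst ∧ "c_list" ∈ addon.map Prod.fst
instance (base : List (String × List Int)) (addon : List (String × List Int)) (vision : Int) : Decidable (Pre_merge_maps base addon vision) := by unfold Pre_merge_maps; infer_instance
def pvWitness_merge_maps : (List (String × List Int)) × (List (String × List Int)) × Int :=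
  ([("x_list", [800, 1]), ("y_list", [2, 3]), ("c_list", [4, 5])],
   [("x_list", [9]), ("y_list", [8]), ("c_list", [7])], 750)
def Spec_merge_maps (base : List (String × List Int)) (addon : List (String × List Int)) (vision : Int) (out : List (String × List Int)) : Prop := out = merge_maps_alt base addon vision
instance (base : List (String × List Int)) (addon : List (String × List Int)) (vision : Int) (out : List (String × List Int)) : Decidable (Spec_merge_maps base addon vision out) := by unfold Spec_merge_maps; infer_instance

-- ===== CLAIM (what is proved, stated in full; the proofs are below) =====
def Claim_equal_merge_maps : Prop := ∀ (base : List (String × List Int)) (addon : List (String × List Int)) (vision : Int), Dom_merge_maps base addon vision → Pre_merge_maps base addon vision → Spec_merge_maps base addon vision (merge_maps base addon vision)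

-- ===== LEMMAS AND PROOFS =====

-- A's loop: foldl with three parallel appends is filter-then-project.
theorem foldl_filter3 (v : Int) (z : List (Int × Int × Int)) (a b c : List Int) :
    z.foldl
      (fun (acc : List Int × List Int × List Int) t =>
        if t.1 > v then (acc.1 ++ [t.1], acc.2.1 ++ [t.2.1], acc.2.2 ++ [t.2.2]) else acc)
      (a, b, c)
    = (a ++ (z.filter (fun t => t.1 > v)).map (·.1),
       b ++ (z.filter (fun t => t.1 > v)).map (·.2.1),
       c ++ (z.filter (fun t => t.1 > v)).map (·.2.2)) := by
  induction z generalizing a b c with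
  | nil => simp
  | cons t z ih =>
    by_cases h : t.1 > v <;> simp [h, ih]

-- B's loop: conditional flat extension is filter-then-flatMap.
theorem foldl_extend_if (v : Int) (z : List (Int × Int × Int)) (acc : List Int) :
    z.foldl
      (fun (acc : List Int) t => if t.1 > v then acc ++ [t.1, t.2.1, t.2.2] else acc) acc
    = acc ++ (z.filter (fun t => t.1 > v)).flatMap (fun t => [t.1, t.2.1, t.2.2]) := by
  induction z generalizing acc with
  | nil => simp
  | cons t z ih =>
    by_cases h : t.1 > v <;> simp [h, ih]

-- A slice with nonnegative start, no stop, step 3 gathers every third element.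
theorem slice3_range (xs : List Int) (r : Nat) (hr : r ≤ xs.length) :
    PySem.List.slice? xs (some (r:Int)) none 3
    = some ((List.range ((xs.length - r + 2)/3)).filterMap (fun k => xs[r + 3*k]?)) := by
  simp only [PySem.List.slice?, PySem.List.sliceIndices]
  norm_num
  have h1 : ¬ ((r:Int) < 0) := by omega
  have h2 : min (r:Int) (xs.length:Int) = (r:Int) := by omega
  simp only [h1, if_false, h2]
  have h3 : (if (r:Int) < (xs.length:Int) then (((xs.length:Int) - r + 3 - 1)/3).toNat else 0)
      = (xs.length - r + 2)/3 := by
    split_ifs with h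
    · have he : ((xs.length:Int) - r + 3 - 1) = ((xs.length - r + 2 : Nat) : Int) := by omega
      rw [he]
      have := Int.natCast_div (xs.length - r + 2) 3
      omega
    · omega
  rw [h3]
  refine List.filterMap_congr ?_
  intro k _
  congr 1

-- The stride-r gather over an interleaved triple buffer recovers the r-th projection.
theorem stride3_interleave (g : Int × Int × Int → Int) (r : Nat) (hr : r < 3)
    (hg : ∀ t : Int × Int × Int, [t.1, t.2.1, t.2.2][r]? = some (g t)) :
    ∀ rows : List (Int × Int × Int),
      (List.range ((3 * rows.length - r + 2)/3)).filterMap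
          (fun k => (rows.flatMap (fun t => [t.1, t.2.1, t.2.2]))[r + 3*k]?)
      = rows.map g := by
  intro rows
  induction rows with
  | nil =>
    simp only [List.length_nil, List.flatMap_nil, Nat.mul_zero, Nat.zero_sub, List.map_nil]
    rw [Nat.div_eq_of_lt (by omega)]
    simp
  | cons t rows ih =>
    have hc : (3 * (t :: rows).length - r + 2)/3 = (3 * rows.length - r + 2)/3 + 1 := by
      simp [List.length_cons]; omega
    rw [hc, List.range_succ_eq_map, List.filterMap_cons, List.filterMap_map]
    have h0 : ((t :: rows).flatMap (fun t => [t.1, t.2.1, t.2.2]))[r + 3*0]? = some (g t) := by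
      rw [List.flatMap_cons]
      rw [List.getElem?_append_left (by simp; omega)]
      simpa using hg t
    rw [h0]
    have hstep : ∀ k : Nat,
        ((t :: rows).flatMap (fun t => [t.1, t.2.1, t.2.2]))[r + 3 * Nat.succ k]?
        = (rows.flatMap (fun t => [t.1, t.2.1, t.2.2]))[r + 3*k]? := by
      intro k
      rw [List.flatMap_cons, List.getElem?_append_right (by simp; omega)]
      simp only [List.length_cons, List.length_nil]
      congr 1
    calc g t :: (List.range ((3 * rows.length - r + 2)/3)).filterMap
          (fun k => ((t :: rows).flatMap (fun t => [t.1, t.2.1, t.2.2]))[r + 3 * Nat.succ k]?)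
        = g t :: (List.range ((3 * rows.length - r + 2)/3)).filterMap
          (fun k => (rows.flatMap (fun t => [t.1, t.2.1, t.2.2]))[r + 3*k]?) := by
          rw [List.filterMap_congr (fun k _ => hstep k)]
      _ = g t :: rows.map g := by rw [ih]
      _ = (t :: rows).map g := by simp

-- flat[r::3] of the interleaved kept-triples buffer is exactly the r-th projection of the kept rows.
theorem slice3_interleave (g : Int × Int × Int → Int) (r : Nat) (hr : r < 3)
    (hg : ∀ t : Int × Int × Int, [t.1, t.2.1, t.2.2][r]? = some (g t))
    (rows : List (Int × Int × Int)) :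
    PySem.List.slice? (rows.flatMap (fun t => [t.1, t.2.1, t.2.2])) (some (r:Int)) none 3
    = some (rows.map g) := by
  cases rows with
  | nil =>
    simp only [List.flatMap_nil]
    simp only [PySem.List.slice?, PySem.List.sliceIndices]
    norm_num
  | cons t rows =>
    have hlen : ((t :: rows).flatMap (fun t => [t.1, t.2.1, t.2.2])).length
        = 3 * (t :: rows).length := by
      simp [List.length_flatMap]; omega
    rw [slice3_range _ r (by rw [hlen]; simp; omega), hlen,
      stride3_interleave g r hr hg (t :: rows)]

-- ===== VERDICT (by name: the statement is the Claim_ definition above) =====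
theorem merge_maps_spec : Claim_equal_merge_maps := by
  intro base addon vision _ _
  unfold Spec_merge_maps merge_maps merge_maps_alt
  simp only []
  set bx := ((PySem.Dict.ofList base).get? "x_list").getD [] with hbx
  set by_ := ((PySem.Dict.ofList base).get? "y_list").getD [] with hby
  set bc := ((PySem.Dict.ofList base).get? "c_list").getD [] with hbc
  rw [foldl_filter3, foldl_extend_if]
  simp only [List.nil_append]
  have h0 := slice3_interleave (·.1) 0 (by omega) (fun t => rfl)
  have h1 := slice3_interleave (·.2.1) 1 (by omega) (fun t => rfl)
  have h2 := slice3_interleave (·.2.2) 2 (by omega) (fun t => rfl)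
  norm_num at h0 h1 h2
  rw [h0, h1, h2]
  simp
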